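-- pv_equiv track=rewrite | github.com/imdomlol/Orchestra | orch/dispatcher.py | _collides_with_active
-- ===== SOURCE A (Python) =====
-- from typing import Any, Protocol
--
-- def _collides_with_active(
--     task: dict[str, Any], active_tasks: list[dict[str, Any]]
-- ) -> bool:
--     owned_files = task.get("owned_files", [])
--     for active_task in active_tasks:
--         for owned in owned_files:
--             for active_owned in active_task.get("owned_files", []):
--                 if globs_may_overlap(owned, active_owned):
--                     return True
--     return False
--
-- def globs_may_overlap(left: str, right: str) -> bool:
--     """Conservatively detect overlap between the simple globs used in tasks."""
--
--     if left == right: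
--         return True
--
--     left_prefix = _static_prefix(left)
--     right_prefix = _static_prefix(right)
--     if not left_prefix or not right_prefix:
--         return True
--     return left_prefix.startswith(right_prefix) or right_prefix.startswith(left_prefix)
--
-- def _static_prefix(pattern: str) -> str:
--     wildcard_indexes = [
--         index for index in (pattern.find("*"), pattern.find("?"), pattern.find("["))
--         if index >= 0
--     ]
--     if not wildcard_indexes:
--         return pattern
--     return pattern[: min(wildcard_indexes)]
-- ===== SOURCE B (Python) =====
-- def _static_prefix(pattern: str) -> str:
--     for i, ch in enumerate(pattern):
--         if ch in "*?[":
--             return pattern[:i]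
--     return pattern
--
--
-- def _collides_with_active(task, active_tasks):
--     owned_files = task.get("owned_files", [])
--     # index every active static prefix once: 'exact' holds the prefixes
--     # themselves, 'closure' holds every prefix of an active prefix
--     exact = set()
--     closure = set()
--     for active_task in active_tasks:
--         for glob in active_task.get("owned_files", []):
--             q = _static_prefix(glob)
--             exact.add(q)
--             for i in range(len(q) + 1):
--                 closure.add(q[:i])
--     for glob in owned_files:
--         p = _static_prefix(glob)
--         if p in closure:
--             return True
--         if any(p[:i] in exact for i in range(len(p) + 1)):
--             return True
--     return False
-- ===== Notes on version B (the rewrite author's own statement) =====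
-- stated objective: alternative
-- what changed: Replaces the N*M pairwise glob comparison by a one-pass index: all active static prefixes (and their prefix closure) go into hash sets once, then each task prefix is answered by O(L) set lookups instead of scanning every active glob; trades the pairwise scan for set preprocessing.
import Mathlib
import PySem

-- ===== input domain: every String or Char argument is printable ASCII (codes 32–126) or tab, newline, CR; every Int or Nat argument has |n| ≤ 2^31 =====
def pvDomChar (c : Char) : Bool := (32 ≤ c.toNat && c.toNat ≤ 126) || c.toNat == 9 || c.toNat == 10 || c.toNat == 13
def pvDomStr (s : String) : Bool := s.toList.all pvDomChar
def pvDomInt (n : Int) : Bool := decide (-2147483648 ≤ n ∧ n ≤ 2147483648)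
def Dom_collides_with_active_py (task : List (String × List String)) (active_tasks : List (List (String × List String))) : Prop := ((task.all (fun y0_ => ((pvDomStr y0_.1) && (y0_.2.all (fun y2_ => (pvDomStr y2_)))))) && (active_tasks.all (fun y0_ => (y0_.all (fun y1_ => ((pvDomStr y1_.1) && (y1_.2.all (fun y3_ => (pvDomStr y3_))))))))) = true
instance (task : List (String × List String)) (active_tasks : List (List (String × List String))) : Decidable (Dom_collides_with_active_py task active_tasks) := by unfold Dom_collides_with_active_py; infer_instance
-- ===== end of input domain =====

-- B replaces the N*M pairwise glob comparison by hash-set indexes of the active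
-- static prefixes (and their prefix closure), queried once per task glob (objective: alternative).


-- ===== PORT A =====
-- _static_prefix: find each wildcard, keep the non-negative indexes, slice at their min
def staticPrefixA (pattern : String) : String :=
  let wildcard_indexes :=
    [PySem.Str.find pattern "*", PySem.Str.find pattern "?", PySem.Str.find pattern "["].filter
      (fun index => decide (0 ≤ index))
  if wildcard_indexes = [] then pattern
  else PySem.Str.slice pattern none (PySem.List.min? wildcard_indexes (fun x => x))

def globsMayOverlapA (left : String) (right : String) : Bool :=
  if left == right then true
  else
    let left_prefix := staticPrefixA left
    let right_prefix := staticPrefixA right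
    if left_prefix == "" || right_prefix == "" then true
    else PySem.Str.startswith left_prefix right_prefix || PySem.Str.startswith right_prefix left_prefix

def collides_with_active_py (task : List (String × List String)) (active_tasks : List (List (String × List String))) : Bool :=
  let owned_files := PySem.Dict.getD (PySem.Dict.mk task) "owned_files" []
  active_tasks.any (fun active_task =>
    owned_files.any (fun owned =>
      (PySem.Dict.getD (PySem.Dict.mk active_task) "owned_files" []).any (fun active_owned =>
        globsMayOverlapA owned active_owned)))

-- ===== PORT B =====
-- _static_prefix (B): scan the characters, cut at the first wildcard
def staticPrefixBChars : List Char → List Char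
  | [] => []
  | c :: cs => if c = '*' || c = '?' || c = '[' then [] else c :: staticPrefixBChars cs

def staticPrefixB (pattern : String) : String := String.ofList (staticPrefixBChars pattern.toList)

-- loop body for one active glob: add its static prefix to 'exact', all its prefixes to 'closure'
def addGlobB (st : PySem.Set String × PySem.Set String) (g : String) :
    PySem.Set String × PySem.Set String :=
  let q := staticPrefixB g
  (PySem.Set.add st.1 q,
   (PySem.List.pyRange 0 (PySem.Str.len q + 1) 1).foldl
     (fun cl i => PySem.Set.add cl (PySem.Str.slice q none (some i))) st.2)

-- loop body for one active task
def addTaskB (st : PySem.Set String × PySem.Set String) (active_task : List (String × List String)) :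
    PySem.Set String × PySem.Set String :=
  (PySem.Dict.getD (PySem.Dict.mk active_task) "owned_files" []).foldl addGlobB st

def collides_with_active_py_alt (task : List (String × List String)) (active_tasks : List (List (String × List String))) : Bool :=
  let owned_files := PySem.Dict.getD (PySem.Dict.mk task) "owned_files" []
  let st := active_tasks.foldl addTaskB (PySem.Set.empty, PySem.Set.empty)
  owned_files.any (fun g =>
    let p := staticPrefixB g
    PySem.Set.contains st.2 p ||
      (PySem.List.pyRange 0 (PySem.Str.len p + 1) 1).any (fun i =>
        PySem.Set.contains st.1 (PySem.Str.slice p none (some i))))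

-- ===== PRECONDITION & SPEC =====
def Spec_collides_with_active_py (task : List (String × List String)) (active_tasks : List (List (String × List String))) (out : Bool) : Prop := out = collides_with_active_py_alt task active_tasks
instance (task : List (String × List String)) (active_tasks : List (List (String × List String))) (out : Bool) : Decidable (Spec_collides_with_active_py task active_tasks out) := by unfold Spec_collides_with_active_py; infer_instance

-- ===== CLAIM (what is proved, stated in full; the proofs are below) =====
def Claim_equal_collides_with_active_py : Prop := ∀ (task : List (String × List String)) (active_tasks : List (List (String × List String))), Dom_collides_with_active_py task active_tasks → Spec_collides_with_active_py task active_tasks (collides_with_active_py task active_tasks)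

-- ===== LEMMAS AND PROOFS =====

-- the wildcard test of both _static_prefix variants
def pvWild (c : Char) : Bool := decide (c = '*') || decide (c = '?') || decide (c = '[')

theorem staticPrefixBChars_eq_take (l : List Char) :
    staticPrefixBChars l = l.take (l.findIdx pvWild) := by
  induction l with
  | nil => rfl
  | cons c cs ih =>
    simp only [staticPrefixBChars, List.findIdx_cons, pvWild]
    by_cases h1 : c = '*' <;> by_cases h2 : c = '?' <;> by_cases h3 : c = '[' <;>
      simp [h1, h2, h3, ih]

theorem singleton_prefix_drop {l : List Char} {w : Char} {i : Nat} :
    [w] <+: l.drop i ↔ l[i]? = some w := by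
  rw [← List.head?_drop]
  cases l.drop i <;> simp [List.cons_prefix_iff]

-- any non-negative wildcard find lands at or after the first wildcard position
theorem find_wild_ge {l : List Char} {w : Char} (hw : pvWild w = true)
    (h : 0 ≤ PySem.Chars.find l [w]) : (l.findIdx pvWild : Int) ≤ PySem.Chars.find l [w] := by
  obtain ⟨h1, -⟩ := PySem.Chars.find_spec h
  rw [singleton_prefix_drop] at h1
  obtain ⟨hlt, hget⟩ := List.getElem?_eq_some_iff.mp h1
  by_contra hc
  have hidx : (PySem.Chars.find l [w]).toNat < l.findIdx pvWild := by omega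
  have h2 := List.not_of_lt_findIdx (p := pvWild) hidx
  have h3 : pvWild w = false := by rw [← hget]; exact h2
  rw [hw] at h3; cases h3

-- the find of the wildcard that actually occurs first equals findIdx
theorem find_wild_first {l : List Char} (hk : l.findIdx pvWild < l.length) :
    PySem.Chars.find l [l[l.findIdx pvWild]] = (l.findIdx pvWild : Int) := by
  set k := l.findIdx pvWild with hkdef
  set w := l[k] with hwdef
  have hmem : w ∈ l := List.getElem_mem hk
  have hnn : 0 ≤ PySem.Chars.find l [w] := by
    rw [PySem.Chars.find_nonneg_iff, List.singleton_infix_iff]; exact hmem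
  obtain ⟨-, h2⟩ := PySem.Chars.find_spec hnn
  have hge : (k : Int) ≤ PySem.Chars.find l [w] :=
    find_wild_ge (List.findIdx_getElem (w := hk)) hnn
  have hle : ¬ (k < (PySem.Chars.find l [w]).toNat) := by
    intro hlt
    exact h2 k hlt (singleton_prefix_drop.mpr (by simp [hwdef]))
  omega

theorem toList_star : ("*" : String).toList = ['*'] := by decide
theorem toList_quest : ("?" : String).toList = ['?'] := by decide
theorem toList_brack : ("[" : String).toList = ['['] := by decide

theorem staticPrefixA_eq_B (s : String) : staticPrefixA s = staticPrefixB s := by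
  apply String.toList_inj.mp
  have hB : (staticPrefixB s).toList = s.toList.take (s.toList.findIdx pvWild) := by
    simp [staticPrefixB, staticPrefixBChars_eq_take]
  rw [hB]
  set k := s.toList.findIdx pvWild with hk
  have hfs : PySem.Str.find s "*" = PySem.Chars.find s.toList ['*'] := by
    simp [toList_star]
  have hfq : PySem.Str.find s "?" = PySem.Chars.find s.toList ['?'] := by
    simp [toList_quest]
  have hfb : PySem.Str.find s "[" = PySem.Chars.find s.toList ['['] := by
    simp [toList_brack]
  by_cases hkl : k < s.toList.length
  · -- a wildcard occurs; A's branch slices at min = k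
    have hw0w : pvWild (s.toList[k]'hkl) = true := List.findIdx_getElem (w := hkl)
    have hfw0 : PySem.Chars.find s.toList [s.toList[k]'hkl] = (k : Int) := find_wild_first hkl
    have hw0mem : (k : Int) ∈ [PySem.Str.find s "*", PySem.Str.find s "?", PySem.Str.find s "["] := by
      simp only [pvWild, Bool.or_eq_true, decide_eq_true_eq] at hw0w
      rcases hw0w with (h | h) | h
      · have he : PySem.Chars.find s.toList ['*'] = (k : Int) := by rw [← h]; exact hfw0
        rw [← he, hfs]; simp
      · have he : PySem.Chars.find s.toList ['?'] = (k : Int) := by rw [← h]; exact hfw0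
        rw [← he, hfq]; simp
      · have he : PySem.Chars.find s.toList ['['] = (k : Int) := by rw [← h]; exact hfw0
        rw [← he, hfb]; simp
    have hge : ∀ i ∈ [PySem.Str.find s "*", PySem.Str.find s "?", PySem.Str.find s "["],
        0 ≤ i → (k : Int) ≤ i := by
      intro i hi hnn
      rw [hfs, hfq, hfb] at hi
      simp only [List.mem_cons, List.not_mem_nil, or_false] at hi
      rcases hi with h | h | h <;> rw [h] at hnn ⊢ <;>
        exact find_wild_ge (by simp [pvWild]) hnn
    set wl := [PySem.Str.find s "*", PySem.Str.find s "?", PySem.Str.find s "["].filter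
      (fun index => decide (0 ≤ index)) with hwl
    have hkin : (k : Int) ∈ wl := by
      rw [hwl, List.mem_filter]
      exact ⟨hw0mem, by simp⟩
    have hne : wl ≠ [] := by intro h; rw [h] at hkin; exact (List.not_mem_nil) hkin
    have hmin : PySem.List.min? wl (fun x => x) = some (k : Int) := by
      rcases hm : PySem.List.min? wl (fun x => x) with - | m
      · exact absurd ((PySem.List.min?_eq_none_iff _ _).mp hm) hne
      · have hmmem := PySem.List.min?_mem hm
        have hmin1 : m ≤ (k : Int) := PySem.List.min?_isMin hm _ hkin
        rw [hwl, List.mem_filter] at hmmem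
        have hmnn : 0 ≤ m := by simpa using hmmem.2
        have hmin2 : (k : Int) ≤ m := hge m hmmem.1 hmnn
        exact congrArg some (le_antisymm hmin1 hmin2)
    simp only [staticPrefixA, ← hwl]
    rw [if_neg hne, hmin]
    simp [PySem.Str.toList_slice, PySem.List.slice_to_natCast]
  · -- no wildcard: all three finds are -1 and A keeps the whole pattern
    have hkeq : k = s.toList.length := by
      have := List.findIdx_le_length (p := pvWild) (xs := s.toList); omega
    have hnone : ∀ c ∈ s.toList, pvWild c = false := List.findIdx_eq_length.mp hkeq
    have hfneg : ∀ w : Char, pvWild w = true → PySem.Chars.find s.toList [w] = -1 := by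
      intro w hw
      rw [PySem.Chars.find_eq_neg_one_iff, List.singleton_infix_iff]
      intro hmem
      rw [hnone w hmem] at hw; cases hw
    have c1 : PySem.Chars.find s.toList ['*'] = -1 := hfneg _ (by decide)
    have c2 : PySem.Chars.find s.toList ['?'] = -1 := hfneg _ (by decide)
    have c3 : PySem.Chars.find s.toList ['['] = -1 := hfneg _ (by decide)
    simp [staticPrefixA, c1, c2, c3, hkeq]

theorem globs_iff (a b : String) :
    globsMayOverlapA a b = true ↔
      ((staticPrefixB a).toList <+: (staticPrefixB b).toList ∨
       (staticPrefixB b).toList <+: (staticPrefixB a).toList) := by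
  simp only [globsMayOverlapA, staticPrefixA_eq_B]
  split_ifs with h1 h2
  · simp only [beq_iff_eq] at h1
    subst h1
    simp
  · simp only [Bool.or_eq_true, beq_iff_eq] at h2
    constructor
    · intro _
      rcases h2 with h | h
      · left; rw [h]; simp
      · right; rw [h]; simp
    · intro _; rfl
  · rw [Bool.or_eq_true]
    simp only [PySem.Str.startswith_eq, PySem.Chars.startswith_iff]
    tauto

theorem mem_foldl_step {α : Type} (F : PySem.Set String → α → PySem.Set String)
    (P : α → String → Prop)
    (hF : ∀ s a x, x ∈ F s a ↔ x ∈ s ∨ P a x) :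
    ∀ (l : List α) (s : PySem.Set String) (x : String),
      x ∈ l.foldl F s ↔ x ∈ s ∨ ∃ a ∈ l, P a x := by
  intro l
  induction l with
  | nil => simp
  | cons a t ih =>
    intro s x
    rw [List.foldl_cons, ih, hF]
    simp only [List.mem_cons]
    constructor
    · rintro ((h | h) | ⟨a', ha', h⟩)
      · exact Or.inl h
      · exact Or.inr ⟨a, Or.inl rfl, h⟩
      · exact Or.inr ⟨a', Or.inr ha', h⟩
    · rintro (h | ⟨a', (rfl | ha'), h⟩)
      · exact Or.inl (Or.inl h)
      · exact Or.inl (Or.inr h)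
      · exact Or.inr ⟨a', ha', h⟩

theorem exists_slice_iff (q x : String) :
    (∃ i ∈ PySem.List.pyRange 0 (PySem.Str.len q + 1) 1, x = PySem.Str.slice q none (some i)) ↔
      x.toList <+: q.toList := by
  constructor
  · rintro ⟨i, hi, rfl⟩
    rw [PySem.List.mem_pyRange_one] at hi
    have h : (PySem.Str.slice q none (some i)).toList = q.toList.take i.toNat := by
      rw [PySem.Str.toList_slice, PySem.Chars.slice_eq_listSlice, PySem.List.slice_to _ hi.1]
    rw [h]
    exact List.take_prefix _ _
  · intro h
    refine ⟨(x.toList.length : Int), ?_, ?_⟩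
    · rw [PySem.List.mem_pyRange_one]
      have hle := List.IsPrefix.length_le h
      have hq : PySem.Str.len q = (q.toList.length : Int) := by simp
      rw [hq]
      omega
    · apply String.toList_inj.mp
      rw [PySem.Str.toList_slice, PySem.Chars.slice_eq_listSlice,
        PySem.List.slice_to _ (by exact Int.natCast_nonneg _)]
      simpa using List.prefix_iff_eq_take.mp h

theorem mem_foldl_addGlob_fst (gs : List String) (st : PySem.Set String × PySem.Set String)
    (x : String) :
    x ∈ (gs.foldl addGlobB st).1 ↔ x ∈ st.1 ∨ ∃ g ∈ gs, x = staticPrefixB g := by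
  induction gs generalizing st with
  | nil => simp
  | cons g t ih =>
    rw [List.foldl_cons, ih]
    simp only [addGlobB, List.mem_cons]
    rw [PySem.Set.mem_add]
    constructor
    · rintro ((h | h) | ⟨g', hg', h⟩)
      · exact Or.inl h
      · exact Or.inr ⟨g, Or.inl rfl, h⟩
      · exact Or.inr ⟨g', Or.inr hg', h⟩
    · rintro (h | ⟨g', (rfl | hg'), h⟩)
      · exact Or.inl (Or.inl h)
      · exact Or.inl (Or.inr h)
      · exact Or.inr ⟨g', hg', h⟩

theorem mem_foldl_addGlob_snd (gs : List String) (st : PySem.Set String × PySem.Set String)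
    (x : String) :
    x ∈ (gs.foldl addGlobB st).2 ↔
      x ∈ st.2 ∨ ∃ g ∈ gs, x.toList <+: (staticPrefixB g).toList := by
  induction gs generalizing st with
  | nil => simp
  | cons g t ih =>
    rw [List.foldl_cons, ih]
    simp only [addGlobB, List.mem_cons]
    rw [mem_foldl_step
      (fun cl i => PySem.Set.add cl (PySem.Str.slice (staticPrefixB g) none (some i)))
      (fun i y => y = PySem.Str.slice (staticPrefixB g) none (some i))
      (fun s a x => PySem.Set.mem_add s (PySem.Str.slice (staticPrefixB g) none (some a)) x)]
    rw [show (∃ i ∈ PySem.List.pyRange 0 (PySem.Str.len (staticPrefixB g) + 1) 1,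
        x = PySem.Str.slice (staticPrefixB g) none (some i)) ↔
        x.toList <+: (staticPrefixB g).toList from exists_slice_iff _ _]
    constructor
    · rintro ((h | h) | ⟨g', hg', h⟩)
      · exact Or.inl h
      · exact Or.inr ⟨g, Or.inl rfl, h⟩
      · exact Or.inr ⟨g', Or.inr hg', h⟩
    · rintro (h | ⟨g', (rfl | hg'), h⟩)
      · exact Or.inl (Or.inl h)
      · exact Or.inl (Or.inr h)
      · exact Or.inr ⟨g', hg', h⟩

theorem mem_build_fst (active : List (List (String × List String))) (x : String) :
    x ∈ (active.foldl addTaskB (PySem.Set.empty, PySem.Set.empty)).1 ↔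
      ∃ a ∈ active, ∃ g ∈ PySem.Dict.getD (PySem.Dict.mk a) "owned_files" [],
        x = staticPrefixB g := by
  have key : ∀ (l : List (List (String × List String))) (st : PySem.Set String × PySem.Set String),
      x ∈ (l.foldl addTaskB st).1 ↔ x ∈ st.1 ∨
        ∃ a ∈ l, ∃ g ∈ PySem.Dict.getD (PySem.Dict.mk a) "owned_files" [], x = staticPrefixB g := by
    intro l
    induction l with
    | nil => simp
    | cons a t ih =>
      intro st
      rw [List.foldl_cons, ih, addTaskB, mem_foldl_addGlob_fst]
      simp only [List.mem_cons]
      constructor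
      · rintro ((h | h) | ⟨a', ha', h⟩)
        · exact Or.inl h
        · exact Or.inr ⟨a, Or.inl rfl, h⟩
        · exact Or.inr ⟨a', Or.inr ha', h⟩
      · rintro (h | ⟨a', (rfl | ha'), h⟩)
        · exact Or.inl (Or.inl h)
        · exact Or.inl (Or.inr h)
        · exact Or.inr ⟨a', ha', h⟩
  rw [key]
  simp [PySem.Set.empty]

theorem mem_build_snd (active : List (List (String × List String))) (x : String) :
    x ∈ (active.foldl addTaskB (PySem.Set.empty, PySem.Set.empty)).2 ↔
      ∃ a ∈ active, ∃ g ∈ PySem.Dict.getD (PySem.Dict.mk a) "owned_files" [],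
        x.toList <+: (staticPrefixB g).toList := by
  have key : ∀ (l : List (List (String × List String))) (st : PySem.Set String × PySem.Set String),
      x ∈ (l.foldl addTaskB st).2 ↔ x ∈ st.2 ∨
        ∃ a ∈ l, ∃ g ∈ PySem.Dict.getD (PySem.Dict.mk a) "owned_files" [],
          x.toList <+: (staticPrefixB g).toList := by
    intro l
    induction l with
    | nil => simp
    | cons a t ih =>
      intro st
      rw [List.foldl_cons, ih, addTaskB, mem_foldl_addGlob_snd]
      simp only [List.mem_cons]
      constructor
      · rintro ((h | h) | ⟨a', ha', h⟩)
        · exact Or.inl h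
        · exact Or.inr ⟨a, Or.inl rfl, h⟩
        · exact Or.inr ⟨a', Or.inr ha', h⟩
      · rintro (h | ⟨a', (rfl | ha'), h⟩)
        · exact Or.inl (Or.inl h)
        · exact Or.inl (Or.inr h)
        · exact Or.inr ⟨a', ha', h⟩
  rw [key]
  simp [PySem.Set.empty]

theorem any_slice_contains (ex : PySem.Set String) (p : String) :
    (∃ i ∈ PySem.List.pyRange 0 (PySem.Str.len p + 1) 1,
        PySem.Set.contains ex (PySem.Str.slice p none (some i)) = true) ↔
      ∃ q ∈ ex, q.toList <+: p.toList := by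
  constructor
  · rintro ⟨i, hi, hc⟩
    exact ⟨_, (PySem.Set.contains_iff _ _).mp hc, (exists_slice_iff p _).mp ⟨i, hi, rfl⟩⟩
  · rintro ⟨q, hq, hpre⟩
    obtain ⟨i, hi, hqe⟩ := (exists_slice_iff p q).mpr hpre
    exact ⟨i, hi, (PySem.Set.contains_iff _ _).mpr (hqe ▸ hq)⟩

-- ===== VERDICT (by name: the statement is the Claim_ definition above) =====
theorem collides_with_active_py_spec : Claim_equal_collides_with_active_py := by
  intro task active _hdom
  show collides_with_active_py task active = collides_with_active_py_alt task active
  rw [Bool.eq_iff_iff]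
  simp only [collides_with_active_py, collides_with_active_py_alt, List.any_eq_true,
    Bool.or_eq_true]
  constructor
  · rintro ⟨a, ha, o, ho, ao, hao, hover⟩
    refine ⟨o, ho, ?_⟩
    rw [globs_iff] at hover
    rcases hover with h | h
    · left
      rw [PySem.Set.contains_iff, mem_build_snd]
      exact ⟨a, ha, ao, hao, h⟩
    · right
      rw [any_slice_contains]
      exact ⟨staticPrefixB ao, (mem_build_fst active _).mpr ⟨a, ha, ao, hao, rfl⟩, h⟩
  · rintro ⟨o, ho, h | h⟩
    · rw [PySem.Set.contains_iff, mem_build_snd] at h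
      obtain ⟨a, ha, ao, hao, hpre⟩ := h
      exact ⟨a, ha, o, ho, ao, hao, (globs_iff o ao).mpr (Or.inl hpre)⟩
    · rw [any_slice_contains] at h
      obtain ⟨q, hq, hpre⟩ := h
      obtain ⟨a, ha, ao, hao, rfl⟩ := (mem_build_fst active q).mp hq
      exact ⟨a, ha, o, ho, ao, hao, (globs_iff o ao).mpr (Or.inr hpre)⟩
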